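-- pv_equiv track=rewrite | github.com/sso312/QueryLens | backend/text-to-sql/backend/app/services/agents/sql_postprocess.py | _find_first_top_level_keyword
-- ===== SOURCE A (Python) =====
-- def _is_ident_char(ch: str) -> bool:
--     return ch.isalnum() or ch in {"_", "$", "#"}
--
-- def _token_at(text_upper: str, idx: int, token: str) -> bool:
--     length = len(token)
--     if text_upper[idx: idx + length] != token:
--         return False
--     prev = text_upper[idx - 1] if idx > 0 else " "
--     nxt = text_upper[idx + length] if idx + length < len(text_upper) else " "
--     if _is_ident_char(prev) or _is_ident_char(nxt):
--         return False
--     return True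
--
-- def _find_first_top_level_keyword(sql: str, start_idx: int, keywords: tuple[str, ...]) -> int:
--     if not sql or start_idx < 0 or start_idx >= len(sql):
--         return -1
--     upper = sql.upper()
--     depth = 0
--     in_single = False
--     i = start_idx
--     while i < len(upper):
--         ch = upper[i]
--         if in_single:
--             if ch == "'":
--                 if i + 1 < len(upper) and upper[i + 1] == "'":
--                     i += 2
--                     continue
--                 in_single = False
--             i += 1
--             continue
--         if ch == "'":
--             in_single = True
--             i += 1
--             continue
--         if ch == "(":
--             depth += 1
--             i += 1
--             continue
--         if ch == ")":
--             depth = max(0, depth - 1)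
--             i += 1
--             continue
--         if depth == 0:
--             for keyword in keywords:
--                 if _token_at(upper, i, keyword.upper()):
--                     return i
--         i += 1
--     return -1
-- ===== SOURCE B (Python) =====
-- def _is_word_char(ch):
--     return ch.isalnum() or ch in "_$#"
--
--
-- def _matches_at(upper, i, tok):
--     if not upper.startswith(tok, i):
--         return False
--     if i > 0 and _is_word_char(upper[i - 1]):
--         return False
--     j = i + len(tok)
--     if j < len(upper) and _is_word_char(upper[j]):
--         return False
--     return True
--
--
-- # One lookahead-free DFA step outside quoted strings: returns
-- # (is this position top-level?, new depth, new state).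
-- def _normal_step(ch, depth):
--     if ch == "'":
--         return False, depth, "string"
--     if ch == "(":
--         return False, depth + 1, "normal"
--     if ch == ")":
--         return False, max(0, depth - 1), "normal"
--     return depth == 0, depth, "normal"
--
--
-- def _find_first_top_level_keyword(sql, start_idx, keywords):
--     if not sql or start_idx < 0 or start_idx >= len(sql):
--         return -1
--     upper = sql.upper()
--     toks = [k.upper() for k in keywords]
--     # pass 1: a 3-state DFA (normal / inside string / quote-just-seen) over the
--     # characters of the suffix, producing one "top-level?" flag per position
--     flags = []
--     state = "normal"
--     depth = 0
--     for ch in upper[start_idx:]: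
--         if state == "string":
--             flags.append(False)
--             if ch == "'":
--                 state = "quote"
--         elif state == "quote":
--             if ch == "'":
--                 # escaped quote: still inside the string
--                 flags.append(False)
--                 state = "string"
--             else:
--                 flag, depth, state = _normal_step(ch, depth)
--                 flags.append(flag)
--         else:
--             flag, depth, state = _normal_step(ch, depth)
--             flags.append(flag)
--     # pass 2: first flagged position where some keyword matches
--     i = start_idx
--     for flag in flags:
--         if flag and any(_matches_at(upper, i, t) for t in toks):
--             return i
--         i += 1
--     return -1
-- ===== Notes on version B (the rewrite author's own statement) =====
-- stated objective: alternative
-- what changed: A's single fused index-jumping scan (with one-character lookahead for '' escapes and an inline early-return keyword loop) is replaced by two staged passes: a lookahead-free 3-state DFA (normal/string/quote-seen) folded over the suffix's characters producing a per-position top-level flag, then a scan returning the first flagged position where some keyword matches.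
import Mathlib
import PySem

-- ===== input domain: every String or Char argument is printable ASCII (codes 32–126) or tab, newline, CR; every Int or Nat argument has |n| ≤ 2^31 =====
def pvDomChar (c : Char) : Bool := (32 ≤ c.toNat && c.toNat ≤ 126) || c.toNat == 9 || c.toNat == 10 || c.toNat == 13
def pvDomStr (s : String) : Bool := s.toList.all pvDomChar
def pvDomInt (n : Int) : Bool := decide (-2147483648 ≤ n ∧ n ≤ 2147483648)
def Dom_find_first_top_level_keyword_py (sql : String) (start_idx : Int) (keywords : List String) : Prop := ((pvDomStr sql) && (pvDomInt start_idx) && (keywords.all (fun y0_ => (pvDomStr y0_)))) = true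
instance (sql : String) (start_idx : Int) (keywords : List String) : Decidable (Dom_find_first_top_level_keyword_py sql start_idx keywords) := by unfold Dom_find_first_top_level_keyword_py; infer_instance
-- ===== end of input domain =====

-- B replaces A's fused index-jumping scan (with one-character lookahead for '' escapes) by two
-- staged passes: a lookahead-free 3-state DFA folded over the suffix's characters producing a
-- per-position top-level flag, then a scan returning the first flagged position where a keyword
-- matches; objective: alternative.

-- ===== PORT A =====

-- _is_ident_char: ch.isalnum() is exact on the ASCII domain via PySem.Chars.isalnum
def pvIsIdentCharA (c : Char) : Bool :=
  PySem.Chars.isalnum c || c == '_' || c == '$' || c == '#'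

-- _token_at: upper[idx:idx+len] with 0 ≤ idx is exactly (drop idx).take len;
-- the two getD reads happen only with the index in range, so getD is exact
def token_at (u : List Char) (idx : Nat) (tok : List Char) : Bool :=
  if ((u.drop idx).take tok.length) ≠ tok then false
  else
    let prev := if idx > 0 then u.getD (idx - 1) ' ' else ' '
    let nxt := if idx + tok.length < u.length then u.getD (idx + tok.length) ' ' else ' '
    if pvIsIdentCharA prev || pvIsIdentCharA nxt then false
    else true

-- the while loop of A (`ch` inlined); the inner `for keyword in keywords: if _token_at: return i`
-- is `if keywords.any … then i` (the returned value does not depend on which keyword fired);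
-- Python's max(0, depth - 1) is Nat subtraction
def loopA (u : List Char) (kws : List String) (i depth : Nat) (inSingle : Bool) : Int :=
  if _h : i < u.length then
    if inSingle then
      if u.getD i ' ' = '\'' then
        if i + 1 < u.length ∧ u.getD (i + 1) ' ' = '\'' then
          loopA u kws (i + 2) depth inSingle
        else
          loopA u kws (i + 1) depth false
      else loopA u kws (i + 1) depth inSingle
    else if u.getD i ' ' = '\'' then loopA u kws (i + 1) depth true
    else if u.getD i ' ' = '(' then loopA u kws (i + 1) (depth + 1) inSingle
    else if u.getD i ' ' = ')' then loopA u kws (i + 1) (depth - 1) inSingle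
    else if depth = 0 ∧ kws.any (fun kw => token_at u i (PySem.Str.upper kw).toList) then (i : Int)
    else loopA u kws (i + 1) depth inSingle
  else -1
termination_by u.length - i
decreasing_by all_goals omega

def find_first_top_level_keyword_py (sql : String) (start_idx : Int) (keywords : List String) : Int :=
  if sql.length = 0 ∨ start_idx < 0 ∨ (sql.length : Int) ≤ start_idx then -1
  else loopA (PySem.Str.upper sql).toList keywords start_idx.toNat 0 false

-- ===== PORT B =====

-- _is_word_char: `ch in "_$#"` on a single char is membership among those three chars
def pvIsWordCharB (c : Char) : Bool :=
  PySem.Chars.isalnum c || c == '_' || c == '$' || c == '#'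

-- _matches_at: upper.startswith(tok, i) with 0 ≤ i is tok.isPrefixOf (u.drop i);
-- the getD reads happen only with the index in range, so getD is exact
def matches_at (u : List Char) (i : Nat) (tok : List Char) : Bool :=
  if ¬ tok.isPrefixOf (u.drop i) then false
  else if 0 < i ∧ pvIsWordCharB (u.getD (i - 1) ' ') then false
  else if i + tok.length < u.length ∧ pvIsWordCharB (u.getD (i + tok.length) ' ') then false
  else true

-- the DFA's state: the string literals "normal" / "string" / "quote" of Source B
inductive BSt : Type
  | normal : BSt
  | string : BSt
  | quote : BSt
deriving DecidableEq, Repr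

-- _normal_step; Python's max(0, depth - 1) is Nat subtraction
def bStep (ch : Char) (depth : Nat) : Bool × Nat × BSt :=
  if ch = '\'' then (false, depth, BSt.string)
  else if ch = '(' then (false, depth + 1, BSt.normal)
  else if ch = ')' then (false, depth - 1, BSt.normal)
  else (decide (depth = 0), depth, BSt.normal)

-- pass 1 of Source B: the `for ch in upper[start_idx:]` fold accumulating `flags`,
-- as structural recursion over the character list
def bFlags : List Char → BSt → Nat → List Bool
  | [], _, _ => []
  | ch :: rest, BSt.string, depth =>
      false :: bFlags rest (if ch = '\'' then BSt.quote else BSt.string) depth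
  | ch :: rest, BSt.quote, depth =>
      if ch = '\'' then false :: bFlags rest BSt.string depth
      else
        match bStep ch depth with
        | (f, d, s) => f :: bFlags rest s d
  | ch :: rest, BSt.normal, depth =>
      match bStep ch depth with
      | (f, d, s) => f :: bFlags rest s d

-- pass 2 of Source B: the `for flag in flags` loop with running index i
def bScan (u : List Char) (toks : List (List Char)) : List Bool → Nat → Int
  | [], _ => -1
  | f :: rest, i =>
      if f && toks.any (fun t => matches_at u i t) then (i : Int)
      else bScan u toks rest (i + 1)

def find_first_top_level_keyword_py_alt (sql : String) (start_idx : Int) (keywords : List String) : Int :=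
  if sql.length = 0 ∨ start_idx < 0 ∨ (sql.length : Int) ≤ start_idx then -1
  else
    let u := (PySem.Str.upper sql).toList
    let toks := keywords.map (fun k => (PySem.Str.upper k).toList)
    bScan u toks (bFlags (u.drop start_idx.toNat) BSt.normal 0) start_idx.toNat

-- ===== PRECONDITION & SPEC =====
def Spec_find_first_top_level_keyword_py (sql : String) (start_idx : Int) (keywords : List String) (out : Int) : Prop := out = find_first_top_level_keyword_py_alt sql start_idx keywords
instance (sql : String) (start_idx : Int) (keywords : List String) (out : Int) : Decidable (Spec_find_first_top_level_keyword_py sql start_idx keywords out) := by unfold Spec_find_first_top_level_keyword_py; infer_instance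

-- ===== CLAIM (what is proved, stated in full; the proofs are below) =====
def Claim_equal_find_first_top_level_keyword_py : Prop := ∀ (sql : String) (start_idx : Int) (keywords : List String), Dom_find_first_top_level_keyword_py sql start_idx keywords → Spec_find_first_top_level_keyword_py sql start_idx keywords (find_first_top_level_keyword_py sql start_idx keywords)

-- ===== LEMMAS AND PROOFS =====

-- B's matcher and A's matcher agree pointwise
lemma matches_at_eq_token_at (u : List Char) (i : Nat) (tok : List Char) :
    matches_at u i tok = token_at u i tok := by
  unfold matches_at token_at
  have hpre : tok.isPrefixOf (u.drop i) = true ↔ (u.drop i).take tok.length = tok := by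
    rw [List.isPrefixOf_iff_prefix, List.prefix_iff_eq_take]
    exact eq_comm
  have hsp : pvIsIdentCharA ' ' = false := by decide
  have hw : pvIsWordCharB = pvIsIdentCharA := rfl
  by_cases hp : tok.isPrefixOf (u.drop i) = true
  · have ht := hpre.mp hp
    by_cases b1 : 0 < i <;>
      by_cases b2 : i + tok.length < u.length <;>
      cases hc1 : pvIsIdentCharA (u.getD (i - 1) ' ') <;>
      cases hc2 : pvIsIdentCharA (u.getD (i + tok.length) ' ') <;>
      simp_all
  · have h2 : ¬ ((u.drop i).take tok.length = tok) := fun h => hp (hpre.mpr h)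
    simp [hp, h2]

-- the two keyword-match conditions coincide
lemma any_toks_eq (u : List Char) (kws : List String) (i : Nat) :
    ((kws.map (fun k => (PySem.Str.upper k).toList)).any (fun t => matches_at u i t))
      = kws.any (fun kw => token_at u i (PySem.Str.upper kw).toList) := by
  rw [List.any_map]
  simp only [Function.comp_def, matches_at_eq_token_at]

-- unfolding equations for A's loop and B's passes
lemma loopA_stop (u : List Char) (kws : List String) (i depth : Nat) (b : Bool)
    (h : ¬ i < u.length) : loopA u kws i depth b = -1 := by
  rw [loopA, dif_neg h]

lemma loopA_unfold_false (u : List Char) (kws : List String) (i depth : Nat)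
    (hi : i < u.length) :
    loopA u kws i depth false =
      if u.getD i ' ' = '\'' then loopA u kws (i + 1) depth true
      else if u.getD i ' ' = '(' then loopA u kws (i + 1) (depth + 1) false
      else if u.getD i ' ' = ')' then loopA u kws (i + 1) (depth - 1) false
      else if depth = 0 ∧ kws.any (fun kw => token_at u i (PySem.Str.upper kw).toList) then (i : Int)
      else loopA u kws (i + 1) depth false := by
  rw [loopA, dif_pos hi, if_neg Bool.false_ne_true]

lemma loopA_unfold_true (u : List Char) (kws : List String) (i depth : Nat)
    (hi : i < u.length) :
    loopA u kws i depth true =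
      if u.getD i ' ' = '\'' then
        (if i + 1 < u.length ∧ u.getD (i + 1) ' ' = '\'' then loopA u kws (i + 2) depth true
         else loopA u kws (i + 1) depth false)
      else loopA u kws (i + 1) depth true := by
  rw [loopA, dif_pos hi, if_pos rfl]

lemma bStep_q (d : Nat) : bStep '\'' d = (false, d, BSt.string) := by
  rw [bStep, if_pos rfl]

lemma bStep_open (d : Nat) : bStep '(' d = (false, d + 1, BSt.normal) := by
  rw [bStep, if_neg (by decide), if_pos rfl]

lemma bStep_close (d : Nat) : bStep ')' d = (false, d - 1, BSt.normal) := by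
  rw [bStep, if_neg (by decide), if_neg (by decide), if_pos rfl]

lemma bStep_other (ch : Char) (d : Nat) (h1 : ¬ ch = '\'') (h2 : ¬ ch = '(')
    (h3 : ¬ ch = ')') : bStep ch d = (decide (d = 0), d, BSt.normal) := by
  rw [bStep, if_neg h1, if_neg h2, if_neg h3]

lemma bFlags_normal (ch : Char) (rest : List Char) (d : Nat) :
    bFlags (ch :: rest) BSt.normal d
      = (bStep ch d).1 :: bFlags rest (bStep ch d).2.2 (bStep ch d).2.1 := by
  rcases hb : bStep ch d with ⟨f, d', s⟩
  simp [bFlags, hb]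

lemma bFlags_string (ch : Char) (rest : List Char) (d : Nat) :
    bFlags (ch :: rest) BSt.string d
      = false :: bFlags rest (if ch = '\'' then BSt.quote else BSt.string) d := by
  simp [bFlags]

lemma bFlags_quote_quote (rest : List Char) (d : Nat) :
    bFlags ('\'' :: rest) BSt.quote d = false :: bFlags rest BSt.string d := by
  simp [bFlags]

lemma bFlags_quote_of_ne (ch : Char) (rest : List Char) (d : Nat) (h : ¬ ch = '\'') :
    bFlags (ch :: rest) BSt.quote d = bFlags (ch :: rest) BSt.normal d := by
  rcases hb : bStep ch d with ⟨f, d', s⟩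
  simp [bFlags, hb, h]

lemma bScan_skip (u : List Char) (toks : List (List Char)) (L : List Bool) (i : Nat) :
    bScan u toks (false :: L) i = bScan u toks L (i + 1) := by
  simp [bScan]

-- A's fused loop equals B's two staged passes, for both values of the in-string state
lemma loopA_eq_scan (u : List Char) (kws : List String) :
    ∀ (n i depth : Nat), u.length ≤ i + n →
      loopA u kws i depth false
          = bScan u (kws.map (fun k => (PySem.Str.upper k).toList))
              (bFlags (u.drop i) BSt.normal depth) i ∧
      loopA u kws i depth true
          = bScan u (kws.map (fun k => (PySem.Str.upper k).toList))
              (bFlags (u.drop i) BSt.string depth) i := by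
  intro n
  induction n with
  | zero =>
    intro i depth h
    have hd : u.drop i = [] := List.drop_eq_nil_of_le (by omega)
    constructor <;> (rw [loopA_stop u kws i depth _ (by omega), hd]; rfl)
  | succ n ih =>
    intro i depth h
    by_cases hi : i < u.length
    · have hdrop : u.drop i = u[i] :: u.drop (i + 1) := List.drop_eq_getElem_cons hi
      have hget : u.getD i ' ' = u[i] := by
        simp [List.getD_eq_getElem?_getD, List.getElem?_eq_getElem hi]
      refine ⟨?_, ?_⟩
      · -- state "normal"
        rw [loopA_unfold_false u kws i depth hi, hget, hdrop, bFlags_normal]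
        by_cases hq : u[i] = '\''
        · rw [if_pos hq, hq, bStep_q, bScan_skip]
          exact (ih (i + 1) depth (by omega)).2
        · rw [if_neg hq]
          by_cases ho : u[i] = '('
          · rw [if_pos ho, ho, bStep_open, bScan_skip]
            exact (ih (i + 1) (depth + 1) (by omega)).1
          · rw [if_neg ho]
            by_cases hc : u[i] = ')'
            · rw [if_pos hc, hc, bStep_close, bScan_skip]
              exact (ih (i + 1) (depth - 1) (by omega)).1
            · rw [if_neg hc, bStep_other u[i] depth hq ho hc, bScan, any_toks_eq]
              by_cases hd0 : depth = 0
              · by_cases ha : kws.any (fun kw => token_at u i (PySem.Str.upper kw).toList) = true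
                · rw [if_pos ⟨hd0, ha⟩,
                    if_pos (by rw [Bool.and_eq_true, decide_eq_true_eq]; exact ⟨hd0, ha⟩)]
                · rw [if_neg (fun hx => ha hx.2),
                    if_neg (by rw [Bool.and_eq_true]; exact fun hx => ha hx.2)]
                  exact (ih (i + 1) depth (by omega)).1
              · rw [if_neg (fun hx => hd0 hx.1),
                  if_neg (by rw [Bool.and_eq_true, decide_eq_true_eq]; exact fun hx => hd0 hx.1)]
                exact (ih (i + 1) depth (by omega)).1
      · -- state "string"
        rw [loopA_unfold_true u kws i depth hi, hget, hdrop, bFlags_string]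
        by_cases hq : u[i] = '\''
        · rw [if_pos hq, if_pos hq, bScan_skip]
          by_cases h2 : i + 1 < u.length ∧ u.getD (i + 1) ' ' = '\''
          · obtain ⟨h2a, h2b⟩ := h2
            have hget2 : u[i + 1] = '\'' := by
              have : u.getD (i + 1) ' ' = u[i + 1] := by
                simp [List.getD_eq_getElem?_getD, List.getElem?_eq_getElem h2a]
              rw [← this]; exact h2b
            rw [if_pos ⟨h2a, h2b⟩, List.drop_eq_getElem_cons h2a, hget2,
              bFlags_quote_quote, bScan_skip]
            exact (ih (i + 2) depth (by omega)).2
          · rw [if_neg h2]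
            have hsame : bFlags (u.drop (i + 1)) BSt.quote depth
                = bFlags (u.drop (i + 1)) BSt.normal depth := by
              by_cases h1 : i + 1 < u.length
              · rw [List.drop_eq_getElem_cons h1]
                refine bFlags_quote_of_ne _ _ _ (fun hx => h2 ⟨h1, ?_⟩)
                simp [List.getD_eq_getElem?_getD, List.getElem?_eq_getElem h1, hx]
              · rw [List.drop_eq_nil_of_le (by omega)]
                rfl
            rw [hsame]
            exact (ih (i + 1) depth (by omega)).1
        · rw [if_neg hq, if_neg hq, bScan_skip]
          exact (ih (i + 1) depth (by omega)).2
    · have hd : u.drop i = [] := List.drop_eq_nil_of_le (by omega)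
      constructor <;> (rw [loopA_stop u kws i depth _ hi, hd]; rfl)

-- ===== VERDICT (by name: the statement is the Claim_ definition above) =====
theorem find_first_top_level_keyword_py_spec : Claim_equal_find_first_top_level_keyword_py := by
  intro sql start_idx keywords _dom
  unfold Spec_find_first_top_level_keyword_py
  unfold find_first_top_level_keyword_py find_first_top_level_keyword_py_alt
  split_ifs with hg
  · rfl
  · exact (loopA_eq_scan (PySem.Str.upper sql).toList keywords
      ((PySem.Str.upper sql).toList.length) start_idx.toNat 0 (by omega)).1
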